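-- pv_equiv track=rewrite | github.com/Siam344/SwinburneUniversity | SWE30009/Assignment 3/Bubble-Sort-main/Bubble-Sort-main/mutants.py | mutant9
-- ===== SOURCE A (Python) =====
-- def mutant9(arr):
--     n = len(arr)
--     for i in range(n):
--         swapped = False
--         for j in range(0, n - i - 1):
--             arr[j], arr[j + 1] = arr[j + 1], arr[j]  # Always swap
--             swapped = True
--         if not swapped:
--             break
--     return arr
-- ===== SOURCE B (Python) =====
-- def mutant9(arr):
--     arr.reverse()
--     return arr
-- ===== Notes on version B (the rewrite author's own statement) =====
-- stated objective: faster
-- what changed: A's n passes of unconditional adjacent swaps amount to reversing the list; B reverses in place directly (same in-place mutation, same return value).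
import Mathlib
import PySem

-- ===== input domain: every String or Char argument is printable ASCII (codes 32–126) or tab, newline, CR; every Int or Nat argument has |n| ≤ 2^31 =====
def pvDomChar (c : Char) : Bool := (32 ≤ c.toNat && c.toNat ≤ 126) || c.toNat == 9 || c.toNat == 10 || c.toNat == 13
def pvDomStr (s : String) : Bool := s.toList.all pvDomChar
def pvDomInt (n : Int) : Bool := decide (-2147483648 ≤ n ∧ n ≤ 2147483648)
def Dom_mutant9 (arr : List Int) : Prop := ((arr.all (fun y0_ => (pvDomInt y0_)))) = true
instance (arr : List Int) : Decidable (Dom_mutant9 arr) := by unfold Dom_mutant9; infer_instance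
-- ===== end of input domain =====

-- B replaces A's O(n^2) passes of unconditional adjacent swaps by a direct in-place
-- reversal (same mutation of the argument, same return value); objective: faster.

-- ===== PORT A =====
-- arr[j], arr[j+1] = arr[j+1], arr[j]  (indices always in range here; fallback unreachable)
def pvSwap (l : List Int) (j : Nat) : List Int :=
  match l[j]?, l[j+1]? with
  | some a, some b => (l.set j b).set (j+1) a
  | _, _ => l

-- one step of the inner 'for j in range(0, n - i - 1)' loop, carrying 'swapped'
def pvInnerStep (s : List Int × Bool) (j : Int) : List Int × Bool :=
  (pvSwap s.1 j.toNat, true)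

-- the outer 'for i in range(n)' loop with its early 'break'
def pvOuter (n : Nat) : List Nat → List Int → List Int
  | [], arr => arr
  | i :: rest, arr =>
    let r := (PySem.List.pyRange 0 ((n : Int) - i - 1) 1).foldl pvInnerStep (arr, false)
    if r.2 then pvOuter n rest r.1 else r.1

def mutant9 (arr : List Int) : List Int :=
  pvOuter arr.length (List.range arr.length) arr

-- ===== PORT B =====
def mutant9_alt (arr : List Int) : List Int := arr.reverse

-- ===== PRECONDITION & SPEC =====
def Spec_mutant9 (arr : List Int) (out : List Int) : Prop := out = mutant9_alt arr
instance (arr : List Int) (out : List Int) : Decidable (Spec_mutant9 arr out) := by unfold Spec_mutant9; infer_instance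

-- ===== CLAIM (what is proved, stated in full; the proofs are below) =====
def Claim_equal_mutant9 : Prop := ∀ (arr : List Int), Dom_mutant9 arr → Spec_mutant9 arr (mutant9 arr)

-- ===== LEMMAS AND PROOFS =====

lemma pvSwap_cons (h : Int) (l : List Int) (j : Nat) :
    pvSwap (h :: l) (j + 1) = h :: pvSwap l j := by
  unfold pvSwap
  cases hj : l[j]? <;> cases hj1 : l[j+1]? <;>
    simp [List.getElem?_cons_succ, hj, hj1, List.set]

lemma pvSwap_spec (p : List Int) (x y : Int) (s : List Int) :
    pvSwap (p ++ x :: y :: s) p.length = p ++ y :: x :: s := by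
  induction p with
  | nil => unfold pvSwap; simp
  | cons h t ih => simpa [pvSwap_cons] using ih

lemma fold_pair (r : List Int) (x : List Int) (b : Bool) :
    r.foldl pvInnerStep (x, b)
      = (r.foldl (fun s j => pvSwap s j.toNat) x, b || !r.isEmpty) := by
  induction r generalizing x b with
  | nil => simp
  | cons j r ih => simp [pvInnerStep, ih]

lemma swapFold (k : Nat) (a : Int) (t : List Int) (h : k ≤ t.length) :
    (PySem.List.pyRange 0 (k : Int) 1).foldl (fun s j => pvSwap s j.toNat) (a :: t)
      = t.take k ++ a :: t.drop k := by
  induction k with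
  | zero => simp [PySem.List.pyRange_one_eq_nil]
  | succ k ih =>
    have hk : k < t.length := h
    rw [show ((k + 1 : Nat) : Int) = (k : Int) + 1 by push_cast; ring,
      PySem.List.pyRange_one_succ_right (by positivity),
      List.foldl_append, ih (le_of_lt hk)]
    have hd : t.drop k = t[k] :: t.drop (k + 1) := Eq.symm (List.getElem_cons_drop hk)
    have hsw := pvSwap_spec (t.take k) a (t[k]) (t.drop (k + 1))
    have hlen : (t.take k).length = k := by simp [Nat.min_eq_left (le_of_lt hk)]
    rw [hd]
    simp only [List.foldl_cons, List.foldl_nil, Int.toNat_natCast]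
    rw [hlen] at hsw
    have htk : t.take (k + 1) = t.take k ++ [t[k]] := by
      rw [List.take_add_one, List.getElem?_eq_getElem hk]
      rfl
    rw [hsw, htk, List.append_assoc, List.singleton_append]

lemma pvOuter_spec (d : Nat) : ∀ (i : Nat) (arr : List Int), i + d = arr.length →
    pvOuter arr.length (List.range' i d) arr = (arr.take d).reverse ++ arr.drop d := by
  induction d with
  | zero => intro i arr _; simp [pvOuter]
  | succ d ih =>
    intro i arr hlen
    obtain ⟨a, t, rfl⟩ : ∃ a t, arr = a :: t := by
      cases arr with
      | nil => simp at hlen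
      | cons a t => exact ⟨a, t, rfl⟩
    have ht : t.length = i + d := by simp at hlen; omega
    have hcount : ((a :: t).length : Int) - i - 1 = (d : Nat) := by
      simp [ht]; ring
    rw [List.range'_succ, pvOuter, hcount, fold_pair,
      swapFold d a t (by omega)]
    cases d with
    | zero =>
      simp [PySem.List.pyRange_one_eq_nil]
    | succ e =>
      have hne : (PySem.List.pyRange 0 ((e + 1 : Nat) : Int) 1).isEmpty = false := by
        rw [PySem.List.pyRange_one_cons (by positivity)]
        simp
      simp only [hne, Bool.or_true, Bool.not_false]
      rw [if_pos trivial]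
      have hlt : (t.take (e+1)).length = e + 1 := by rw [List.length_take]; omega
      have harr' : (t.take (e+1) ++ a :: t.drop (e+1)).length = (a :: t).length := by
        simp only [List.length_append, List.length_cons, List.length_drop, hlt]; omega
      rw [← harr', ih (i + 1) _ (by
        simp only [List.length_append, List.length_cons, List.length_drop, hlt]; omega)]
      rw [List.take_append_of_le_length (by omega), List.take_take,
        List.drop_append_of_le_length (by omega),
        List.drop_eq_nil_of_le (by omega)]
      simp [List.take_succ_cons, List.drop_succ_cons]

-- ===== VERDICT (by name: the statement is the Claim_ definition above) =====
theorem mutant9_spec : Claim_equal_mutant9 := by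
  intro arr _
  show mutant9 arr = mutant9_alt arr
  unfold mutant9 mutant9_alt
  rw [List.range_eq_range', pvOuter_spec arr.length 0 arr (by simp)]
  simp
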